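-- pv_equiv track=rewrite | github.com/Temoor-49/Vocal_Health_Companion | backend/main.py | extract_speaking_feedback
-- ===== SOURCE A (Python) =====
-- def extract_speaking_feedback(ai_response: str, user_message: str) -> str:
--     """Extract specific speaking feedback from AI response"""
--     feedback_keywords = [
--         "speak", "present", "voice", "pace", "pause", "confidence",
--         "clarity", "articulate", "pronounce", "volume", "tone",
--         "body language", "eye contact", "nervous", "anxious",
--         "practice", "improve", "better", "suggestion", "tip"
--     ]
--
--     user_lower = user_message.lower()
--     ai_lower = ai_response.lower()
--
--     # Check if conversation is about speaking
--     is_speaking_topic = any(keyword in user_lower for keyword in feedback_keywords)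
--
--     if is_speaking_topic:
--         # Try to extract the most actionable feedback
--         sentences = ai_response.split('.')
--         for sentence in sentences:
--             sentence_lower = sentence.lower()
--             if any(keyword in sentence_lower for keyword in ['try', 'suggest', 'recommend', 'practice', 'improve']):
--                 return sentence.strip()
--
--         # Fallback to first sentence that contains feedback
--         for sentence in sentences:
--             if any(keyword in sentence.lower() for keyword in feedback_keywords):
--                 return sentence.strip()
--
--     # Default generic feedback
--     return "Great job engaging in speaking practice! Keep working on clear communication."
-- ===== SOURCE B (Python) =====
-- def extract_speaking_feedback(ai_response: str, user_message: str) -> str: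
--     """Extract specific speaking feedback from AI response (single pass over sentences)."""
--     feedback_keywords = [
--         "speak", "present", "voice", "pace", "pause", "confidence",
--         "clarity", "articulate", "pronounce", "volume", "tone",
--         "body language", "eye contact", "nervous", "anxious",
--         "practice", "improve", "better", "suggestion", "tip"
--     ]
--     user_lower = user_message.lower()
--     if any(keyword in user_lower for keyword in feedback_keywords):
--         action_keywords = ("try", "suggest", "recommend", "practice", "improve")
--         first_feedback = None
--         for sentence in ai_response.split('.'):
--             sentence_lower = sentence.lower()
--             if any(keyword in sentence_lower for keyword in action_keywords):
--                 return sentence.strip()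
--             if first_feedback is None and any(keyword in sentence_lower for keyword in feedback_keywords):
--                 first_feedback = sentence
--         if first_feedback is not None:
--             return first_feedback.strip()
--     return "Great job engaging in speaking practice! Keep working on clear communication."
-- ===== Notes on version B (the rewrite author's own statement) =====
-- stated objective: alternative
-- what changed: A scans the sentence list twice (one full pass for action keywords, then a second pass for feedback keywords); B makes a single pass that returns immediately on an action sentence while remembering the first feedback-only sentence, used only if the pass ends without an action hit.
import Mathlib
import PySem

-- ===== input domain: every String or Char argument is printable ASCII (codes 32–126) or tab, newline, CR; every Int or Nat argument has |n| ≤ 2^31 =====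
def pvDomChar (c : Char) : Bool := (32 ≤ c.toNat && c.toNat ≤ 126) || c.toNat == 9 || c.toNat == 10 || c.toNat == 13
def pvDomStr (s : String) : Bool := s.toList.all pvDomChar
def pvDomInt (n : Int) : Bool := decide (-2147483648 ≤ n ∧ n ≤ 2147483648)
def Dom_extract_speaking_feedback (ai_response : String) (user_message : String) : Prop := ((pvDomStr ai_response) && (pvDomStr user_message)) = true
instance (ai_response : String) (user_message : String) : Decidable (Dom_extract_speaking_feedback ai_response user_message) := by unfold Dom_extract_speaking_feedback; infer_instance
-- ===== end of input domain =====

-- B replaces A's two sequential scans of the sentence list by one pass that remembers the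
-- first feedback-only sentence while looking for an action sentence (objective: alternative).

-- shared keyword lists (identical literals in both Pythons)
def pvFeedbackKeywords : List String :=
  ["speak", "present", "voice", "pace", "pause", "confidence",
   "clarity", "articulate", "pronounce", "volume", "tone",
   "body language", "eye contact", "nervous", "anxious",
   "practice", "improve", "better", "suggestion", "tip"]

def pvActionKeywords : List String := ["try", "suggest", "recommend", "practice", "improve"]

def pvDefaultFeedback : String :=
  "Great job engaging in speaking practice! Keep working on clear communication."

-- a sentence (lower-cased) contains an action / feedback keyword
def pvHasAction (s : String) : Bool :=
  pvActionKeywords.any (fun k => PySem.Str.isIn k (PySem.Str.lower s))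
def pvHasFeedback (s : String) : Bool :=
  pvFeedbackKeywords.any (fun k => PySem.Str.isIn k (PySem.Str.lower s))

-- ai_response.split('.')  ('.' is a non-empty separator, so Python never raises here)
def pvSentences (a : String) : List String :=
  (PySem.Chars.splitOn a.toList ['.']).map String.mk

-- ===== PORT A =====
-- first for-loop of A: return the first sentence containing an action keyword
def pvAFindAction : List String → Option String
  | [] => none
  | s :: rest =>
    if pvHasAction s then some s
    else pvAFindAction rest

-- second for-loop of A: return the first sentence containing a feedback keyword
def pvAFindFeedback : List String → Option String
  | [] => none
  | s :: rest =>
    if pvHasFeedback s then some s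
    else pvAFindFeedback rest

def extract_speaking_feedback (ai_response : String) (user_message : String) : String :=
  let user_lower := PySem.Str.lower user_message
  let _ai_lower := PySem.Str.lower ai_response
  let is_speaking_topic := pvFeedbackKeywords.any (fun k => PySem.Str.isIn k user_lower)
  if is_speaking_topic then
    let sentences := pvSentences ai_response
    match pvAFindAction sentences with
    | some s => PySem.Str.strip s
    | none =>
      match pvAFindFeedback sentences with
      | some s => PySem.Str.strip s
      | none => pvDefaultFeedback
  else pvDefaultFeedback

-- ===== PORT B =====
-- B's single loop: state = first feedback-only sentence seen so far (first_feedback)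
def pvBLoop : List String → Option String → String
  | [], none => pvDefaultFeedback
  | [], some f => PySem.Str.strip f
  | s :: rest, acc =>
    if pvHasAction s then PySem.Str.strip s
    else pvBLoop rest
      (if acc.isNone && pvHasFeedback s then some s else acc)

def extract_speaking_feedback_alt (ai_response : String) (user_message : String) : String :=
  let user_lower := PySem.Str.lower user_message
  if pvFeedbackKeywords.any (fun k => PySem.Str.isIn k user_lower) then
    pvBLoop (pvSentences ai_response) none
  else pvDefaultFeedback

-- ===== PRECONDITION & SPEC =====
def Spec_extract_speaking_feedback (ai_response : String) (user_message : String) (out : String) : Prop := out = extract_speaking_feedback_alt ai_response user_message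
instance (ai_response : String) (user_message : String) (out : String) : Decidable (Spec_extract_speaking_feedback ai_response user_message out) := by unfold Spec_extract_speaking_feedback; infer_instance

-- ===== CLAIM (what is proved, stated in full; the proofs are below) =====
def Claim_equal_extract_speaking_feedback : Prop := ∀ (ai_response : String) (user_message : String), Dom_extract_speaking_feedback ai_response user_message → Spec_extract_speaking_feedback ai_response user_message (extract_speaking_feedback ai_response user_message)

-- ===== LEMMAS AND PROOFS =====

-- B's one-pass loop computes exactly A's two-pass result, for any accumulator.
theorem pvBLoop_eq (l : List String) :
    ∀ acc : Option String,
      pvBLoop l acc =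
        match pvAFindAction l with
        | some s => PySem.Str.strip s
        | none =>
          match acc with
          | some f => PySem.Str.strip f
          | none =>
            match pvAFindFeedback l with
            | some s => PySem.Str.strip s
            | none => pvDefaultFeedback := by
  induction l with
  | nil => intro acc; cases acc <;> rfl
  | cons s rest ih =>
    intro acc
    simp only [pvBLoop, pvAFindAction, pvAFindFeedback]
    by_cases ha : pvHasAction s = true
    · simp only [ha, if_true]
    · simp only [Bool.not_eq_true] at ha
      simp only [ha, Bool.false_eq_true, if_false]
      rw [ih]
      by_cases hf : pvHasFeedback s = true
      · cases acc <;> simp [hf]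
      · simp only [Bool.not_eq_true] at hf
        cases acc <;> simp [hf]

-- ===== VERDICT (by name: the statement is the Claim_ definition above) =====
theorem extract_speaking_feedback_spec : Claim_equal_extract_speaking_feedback := by
  intro ai um _
  unfold Spec_extract_speaking_feedback extract_speaking_feedback extract_speaking_feedback_alt
  by_cases h : (pvFeedbackKeywords.any (fun k => PySem.Str.isIn k (PySem.Str.lower um))) = true
  · simp only [h, if_true, pvBLoop_eq]
  · simp only [Bool.not_eq_true] at h
    simp only [h, Bool.false_eq_true, if_false]
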